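-- pv_equiv track=rewrite | github.com/shanayatunk/Feelori-WhatsApp-Chatz | backend/app/services/order_service.py | _identify_search_category
-- ===== SOURCE A (Python) =====
-- from typing import Set, Dict, List, Tuple, Optional, Any
--
-- def _identify_search_category(keywords: List[str]) -> str:
--     """Identifies the primary product category from a list of keywords."""
--     specific = {
--         "bangles": {"bangle", "bangles"}, "bracelets": {"bracelet", "bracelets"}, "rings": {"ring", "rings"},
--         "necklaces": {"necklace", "necklaces", "haram", "choker"}, "earrings": {"earring", "earrings", "jhumka"},
--         "hair_extensions": {"hair extension", "hair extensions"}
--     }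
--     for cat, terms in specific.items():
--         if any(w in terms for w in keywords):
--             return cat
--     if any(w in {"set", "sets", "matching"} for w in keywords):
--         return "sets"
--     return "unknown"
-- ===== SOURCE B (Python) =====
-- _CATEGORIES = [
--     ("bangles", ("bangle", "bangles")),
--     ("bracelets", ("bracelet", "bracelets")),
--     ("rings", ("ring", "rings")),
--     ("necklaces", ("necklace", "necklaces", "haram", "choker")),
--     ("earrings", ("earring", "earrings", "jhumka")),
--     ("hair_extensions", ("hair extension", "hair extensions")),
--     ("sets", ("set", "sets", "matching")),
-- ]
--
-- _INDEX = {}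
-- for _rank, (_cat, _terms) in enumerate(_CATEGORIES):
--     for _t in _terms:
--         _INDEX[_t] = (_cat, _rank)
--
--
-- def _identify_search_category(keywords):
--     """Identifies the primary product category from a list of keywords."""
--     best = None
--     for w in keywords:
--         hit = _INDEX.get(w)
--         if hit is not None and (best is None or hit[1] < best[1]):
--             best = hit
--     return best[0] if best is not None else "unknown"
-- ===== Notes on version B (the rewrite author's own statement) =====
-- stated objective: faster
-- what changed: Replaces the per-category scans over the keyword list (up to 7 membership passes) by a single precomputed term->(category,rank) dict and one pass over the keywords keeping the hit with minimum rank.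
import Mathlib
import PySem

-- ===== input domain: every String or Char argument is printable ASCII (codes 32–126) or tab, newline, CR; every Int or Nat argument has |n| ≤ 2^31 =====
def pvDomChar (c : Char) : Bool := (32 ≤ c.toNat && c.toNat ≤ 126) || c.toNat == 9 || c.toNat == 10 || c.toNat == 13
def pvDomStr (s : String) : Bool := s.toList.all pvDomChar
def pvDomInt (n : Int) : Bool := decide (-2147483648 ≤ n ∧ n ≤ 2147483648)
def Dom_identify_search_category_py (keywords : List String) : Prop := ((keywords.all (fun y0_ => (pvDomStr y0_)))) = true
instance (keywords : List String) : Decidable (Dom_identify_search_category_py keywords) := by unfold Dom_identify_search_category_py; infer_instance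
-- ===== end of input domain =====

-- B replaces A's per-category scans over the keyword list by one precomputed
-- term -> (category, rank) index and a single min-rank pass over the keywords.

-- ===== PORT A =====
def pvSpecific : List (String × PySem.Set String) :=
  [("bangles", PySem.Set.ofList ["bangle", "bangles"]),
   ("bracelets", PySem.Set.ofList ["bracelet", "bracelets"]),
   ("rings", PySem.Set.ofList ["ring", "rings"]),
   ("necklaces", PySem.Set.ofList ["necklace", "necklaces", "haram", "choker"]),
   ("earrings", PySem.Set.ofList ["earring", "earrings", "jhumka"]),
   ("hair_extensions", PySem.Set.ofList ["hair extension", "hair extensions"])]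

-- the 'for cat, terms in specific.items(): if any(...): return cat' loop
def pvFindCat : List (String × PySem.Set String) → List String → Option String
  | [], _ => none
  | (cat, terms) :: rest, ks =>
      if ks.any (fun w => PySem.Set.contains terms w) then some cat else pvFindCat rest ks

def identify_search_category_py (keywords : List String) : String :=
  match pvFindCat pvSpecific keywords with
  | some cat => cat
  | none =>
      if keywords.any (fun w => PySem.Set.contains (PySem.Set.ofList ["set", "sets", "matching"]) w) then "sets"
      else "unknown"

-- ===== PORT B =====
def pvCategories : List (String × List String) :=
  [("bangles", ["bangle", "bangles"]),
   ("bracelets", ["bracelet", "bracelets"]),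
   ("rings", ["ring", "rings"]),
   ("necklaces", ["necklace", "necklaces", "haram", "choker"]),
   ("earrings", ["earring", "earrings", "jhumka"]),
   ("hair_extensions", ["hair extension", "hair extensions"]),
   ("sets", ["set", "sets", "matching"])]

-- module-level build: for rank, (cat, terms) in enumerate(_CATEGORIES): for t in terms: _INDEX[t] = (cat, rank)
def pvIndex : PySem.Dict String (String × Int) :=
  (PySem.List.enumerate pvCategories).foldl
    (fun d p => p.2.2.foldl (fun d t => PySem.Dict.insert d t (p.2.1, p.1)) d)
    PySem.Dict.empty

-- loop body: hit = _INDEX.get(w); if hit is not None and (best is None or hit[1] < best[1]): best = hit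
def pvStep (best : Option (String × Int)) (w : String) : Option (String × Int) :=
  match PySem.Dict.get? pvIndex w with
  | none => best
  | some hit =>
      match best with
      | none => some hit
      | some b => if hit.2 < b.2 then some hit else best

def identify_search_category_py_alt (keywords : List String) : String :=
  match keywords.foldl pvStep none with
  | some b => b.1
  | none => "unknown"

-- ===== PRECONDITION & SPEC =====
def Spec_identify_search_category_py (keywords : List String) (out : String) : Prop := out = identify_search_category_py_alt keywords
instance (keywords : List String) (out : String) : Decidable (Spec_identify_search_category_py keywords out) := by unfold Spec_identify_search_category_py; infer_instance

-- ===== CLAIM (what is proved, stated in full; the proofs are below) =====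
def Claim_equal_identify_search_category_py : Prop := ∀ (keywords : List String), Dom_identify_search_category_py keywords → Spec_identify_search_category_py keywords (identify_search_category_py keywords)

-- ===== LEMMAS AND PROOFS =====
-- category name of a rank (7 = no category matched)
def pvCatName (r : Int) : String :=
  if r = 0 then "bangles" else if r = 1 then "bracelets" else if r = 2 then "rings"
  else if r = 3 then "necklaces" else if r = 4 then "earrings"
  else if r = 5 then "hair_extensions" else if r = 6 then "sets" else "unknown"

-- rank of a single keyword (7 = matches no category)
def pvRk (w : String) : Int :=
  if w = "bangle" then 0 else if w = "bangles" then 0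
  else if w = "bracelet" then 1 else if w = "bracelets" then 1
  else if w = "ring" then 2 else if w = "rings" then 2
  else if w = "necklace" then 3 else if w = "necklaces" then 3
  else if w = "haram" then 3 else if w = "choker" then 3
  else if w = "earring" then 4 else if w = "earrings" then 4
  else if w = "jhumka" then 4
  else if w = "hair extension" then 5 else if w = "hair extensions" then 5
  else if w = "set" then 6 else if w = "sets" then 6 else if w = "matching" then 6
  else 7

-- minimal matched rank over a keyword list (7 = none matches)
def pvRank (ks : List String) : Int :=
  if ks.any (fun w => PySem.Set.contains (PySem.Set.ofList ["bangle", "bangles"]) w) then 0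
  else if ks.any (fun w => PySem.Set.contains (PySem.Set.ofList ["bracelet", "bracelets"]) w) then 1
  else if ks.any (fun w => PySem.Set.contains (PySem.Set.ofList ["ring", "rings"]) w) then 2
  else if ks.any (fun w => PySem.Set.contains (PySem.Set.ofList ["necklace", "necklaces", "haram", "choker"]) w) then 3
  else if ks.any (fun w => PySem.Set.contains (PySem.Set.ofList ["earring", "earrings", "jhumka"]) w) then 4
  else if ks.any (fun w => PySem.Set.contains (PySem.Set.ofList ["hair extension", "hair extensions"]) w) then 5
  else if ks.any (fun w => PySem.Set.contains (PySem.Set.ofList ["set", "sets", "matching"]) w) then 6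
  else 7

-- the fold accumulator after having seen minimal rank r (7 = still None)
def pvAcc (r : Int) : Option (String × Int) :=
  if 7 ≤ r then none else some (pvCatName r, r)

lemma pvRank_bounds (ks : List String) : 0 ≤ pvRank ks ∧ pvRank ks ≤ 7 := by
  unfold pvRank; split_ifs <;> omega

lemma pvA_eq_rank (ks : List String) :
    identify_search_category_py ks = pvCatName (pvRank ks) := by
  unfold identify_search_category_py pvRank
  simp only [pvSpecific, pvFindCat]
  split_ifs <;> rfl

-- the dict built by B's module-level loops, as a literal
lemma pvIndex_eval : pvIndex = PySem.Dict.mk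
    [("bangle", ("bangles", 0)), ("bangles", ("bangles", 0)),
     ("bracelet", ("bracelets", 1)), ("bracelets", ("bracelets", 1)),
     ("ring", ("rings", 2)), ("rings", ("rings", 2)),
     ("necklace", ("necklaces", 3)), ("necklaces", ("necklaces", 3)),
     ("haram", ("necklaces", 3)), ("choker", ("necklaces", 3)),
     ("earring", ("earrings", 4)), ("earrings", ("earrings", 4)),
     ("jhumka", ("earrings", 4)),
     ("hair extension", ("hair_extensions", 5)), ("hair extensions", ("hair_extensions", 5)),
     ("set", ("sets", 6)), ("sets", ("sets", 6)), ("matching", ("sets", 6))] := by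
  decide

set_option maxHeartbeats 2000000 in
lemma pvRank_cons (w : String) (ks : List String) :
    pvRank (w :: ks) = min (pvRk w) (pvRank ks) := by
  by_cases h1 : w = "bangle"
  · subst h1
    have hh : pvRk "bangle" = 0 := by decide
    rw [hh]
    simp only [pvRank, List.any_cons]
    simp [PySem.Set.contains, PySem.Set.ofList] <;> first | omega | (split_ifs <;> omega)
  · by_cases h2 : w = "bangles"
    · subst h2
      have hh : pvRk "bangles" = 0 := by decide
      rw [hh]
      simp only [pvRank, List.any_cons]
      simp [PySem.Set.contains, PySem.Set.ofList] <;> first | omega | (split_ifs <;> omega)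
    · by_cases h3 : w = "bracelet"
      · subst h3
        have hh : pvRk "bracelet" = 1 := by decide
        rw [hh]
        simp only [pvRank, List.any_cons]
        simp [PySem.Set.contains, PySem.Set.ofList] <;> first | omega | (split_ifs <;> omega)
      · by_cases h4 : w = "bracelets"
        · subst h4
          have hh : pvRk "bracelets" = 1 := by decide
          rw [hh]
          simp only [pvRank, List.any_cons]
          simp [PySem.Set.contains, PySem.Set.ofList] <;> first | omega | (split_ifs <;> omega)
        · by_cases h5 : w = "ring"
          · subst h5
            have hh : pvRk "ring" = 2 := by decide
            rw [hh]
            simp only [pvRank, List.any_cons]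
            simp [PySem.Set.contains, PySem.Set.ofList] <;> first | omega | (split_ifs <;> omega)
          · by_cases h6 : w = "rings"
            · subst h6
              have hh : pvRk "rings" = 2 := by decide
              rw [hh]
              simp only [pvRank, List.any_cons]
              simp [PySem.Set.contains, PySem.Set.ofList] <;> first | omega | (split_ifs <;> omega)
            · by_cases h7 : w = "necklace"
              · subst h7
                have hh : pvRk "necklace" = 3 := by decide
                rw [hh]
                simp only [pvRank, List.any_cons]
                simp [PySem.Set.contains, PySem.Set.ofList] <;> first | omega | (split_ifs <;> omega)
              · by_cases h8 : w = "necklaces"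
                · subst h8
                  have hh : pvRk "necklaces" = 3 := by decide
                  rw [hh]
                  simp only [pvRank, List.any_cons]
                  simp [PySem.Set.contains, PySem.Set.ofList] <;> first | omega | (split_ifs <;> omega)
                · by_cases h9 : w = "haram"
                  · subst h9
                    have hh : pvRk "haram" = 3 := by decide
                    rw [hh]
                    simp only [pvRank, List.any_cons]
                    simp [PySem.Set.contains, PySem.Set.ofList] <;> first | omega | (split_ifs <;> omega)
                  · by_cases h10 : w = "choker"
                    · subst h10
                      have hh : pvRk "choker" = 3 := by decide
                      rw [hh]
                      simp only [pvRank, List.any_cons]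
                      simp [PySem.Set.contains, PySem.Set.ofList] <;> first | omega | (split_ifs <;> omega)
                    · by_cases h11 : w = "earring"
                      · subst h11
                        have hh : pvRk "earring" = 4 := by decide
                        rw [hh]
                        simp only [pvRank, List.any_cons]
                        simp [PySem.Set.contains, PySem.Set.ofList] <;> first | omega | (split_ifs <;> omega)
                      · by_cases h12 : w = "earrings"
                        · subst h12
                          have hh : pvRk "earrings" = 4 := by decide
                          rw [hh]
                          simp only [pvRank, List.any_cons]
                          simp [PySem.Set.contains, PySem.Set.ofList] <;> first | omega | (split_ifs <;> omega)
                        · by_cases h13 : w = "jhumka"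
                          · subst h13
                            have hh : pvRk "jhumka" = 4 := by decide
                            rw [hh]
                            simp only [pvRank, List.any_cons]
                            simp [PySem.Set.contains, PySem.Set.ofList] <;> first | omega | (split_ifs <;> omega)
                          · by_cases h14 : w = "hair extension"
                            · subst h14
                              have hh : pvRk "hair extension" = 5 := by decide
                              rw [hh]
                              simp only [pvRank, List.any_cons]
                              simp [PySem.Set.contains, PySem.Set.ofList] <;> first | omega | (split_ifs <;> omega)
                            · by_cases h15 : w = "hair extensions"
                              · subst h15
                                have hh : pvRk "hair extensions" = 5 := by decide
                                rw [hh]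
                                simp only [pvRank, List.any_cons]
                                simp [PySem.Set.contains, PySem.Set.ofList] <;> first | omega | (split_ifs <;> omega)
                              · by_cases h16 : w = "set"
                                · subst h16
                                  have hh : pvRk "set" = 6 := by decide
                                  rw [hh]
                                  simp only [pvRank, List.any_cons]
                                  simp [PySem.Set.contains, PySem.Set.ofList] <;> first | omega | (split_ifs <;> omega)
                                · by_cases h17 : w = "sets"
                                  · subst h17
                                    have hh : pvRk "sets" = 6 := by decide
                                    rw [hh]
                                    simp only [pvRank, List.any_cons]
                                    simp [PySem.Set.contains, PySem.Set.ofList] <;> first | omega | (split_ifs <;> omega)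
                                  · by_cases h18 : w = "matching"
                                    · subst h18
                                      have hh : pvRk "matching" = 6 := by decide
                                      rw [hh]
                                      simp only [pvRank, List.any_cons]
                                      simp [PySem.Set.contains, PySem.Set.ofList] <;> first | omega | (split_ifs <;> omega)
                                    · have hh : pvRk w = 7 := by simp [pvRk, h1, h2, h3, h4, h5, h6, h7, h8, h9, h10, h11, h12, h13, h14, h15, h16, h17, h18]
                                      rw [hh]
                                      simp only [pvRank, List.any_cons]
                                      simp [PySem.Set.contains, PySem.Set.ofList, h1, h2, h3, h4, h5, h6, h7, h8, h9, h10, h11, h12, h13, h14, h15, h16, h17, h18] <;> first | omega | (split_ifs <;> omega)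

set_option maxHeartbeats 2000000 in
lemma pvGet_eq (w : String) :
    PySem.Dict.get? pvIndex w =
      if pvRk w ≤ 6 then some (pvCatName (pvRk w), pvRk w) else none := by
  by_cases h1 : w = "bangle"
  · subst h1
    decide
  · by_cases h2 : w = "bangles"
    · subst h2
      decide
    · by_cases h3 : w = "bracelet"
      · subst h3
        decide
      · by_cases h4 : w = "bracelets"
        · subst h4
          decide
        · by_cases h5 : w = "ring"
          · subst h5
            decide
          · by_cases h6 : w = "rings"
            · subst h6
              decide
            · by_cases h7 : w = "necklace"
              · subst h7
                decide
              · by_cases h8 : w = "necklaces"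
                · subst h8
                  decide
                · by_cases h9 : w = "haram"
                  · subst h9
                    decide
                  · by_cases h10 : w = "choker"
                    · subst h10
                      decide
                    · by_cases h11 : w = "earring"
                      · subst h11
                        decide
                      · by_cases h12 : w = "earrings"
                        · subst h12
                          decide
                        · by_cases h13 : w = "jhumka"
                          · subst h13
                            decide
                          · by_cases h14 : w = "hair extension"
                            · subst h14
                              decide
                            · by_cases h15 : w = "hair extensions"
                              · subst h15
                                decide
                              · by_cases h16 : w = "set"
                                · subst h16
                                  decide
                                · by_cases h17 : w = "sets"
                                  · subst h17
                                    decide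
                                  · by_cases h18 : w = "matching"
                                    · subst h18
                                      decide
                                    · have hh : pvRk w = 7 := by simp [pvRk, h1, h2, h3, h4, h5, h6, h7, h8, h9, h10, h11, h12, h13, h14, h15, h16, h17, h18]
                                      rw [pvIndex_eval, hh]
                                      simp [PySem.Dict.get?, Ne.symm h1, Ne.symm h2, Ne.symm h3, Ne.symm h4, Ne.symm h5, Ne.symm h6, Ne.symm h7, Ne.symm h8, Ne.symm h9, Ne.symm h10, Ne.symm h11, Ne.symm h12, Ne.symm h13, Ne.symm h14, Ne.symm h15, Ne.symm h16, Ne.symm h17, Ne.symm h18]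

set_option maxHeartbeats 2000000 in
lemma pvRk_bounds (w : String) : 0 ≤ pvRk w ∧ pvRk w ≤ 7 := by
  by_cases h1 : w = "bangle"
  · subst h1
    decide
  · by_cases h2 : w = "bangles"
    · subst h2
      decide
    · by_cases h3 : w = "bracelet"
      · subst h3
        decide
      · by_cases h4 : w = "bracelets"
        · subst h4
          decide
        · by_cases h5 : w = "ring"
          · subst h5
            decide
          · by_cases h6 : w = "rings"
            · subst h6
              decide
            · by_cases h7 : w = "necklace"
              · subst h7
                decide
              · by_cases h8 : w = "necklaces"
                · subst h8
                  decide
                · by_cases h9 : w = "haram"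
                  · subst h9
                    decide
                  · by_cases h10 : w = "choker"
                    · subst h10
                      decide
                    · by_cases h11 : w = "earring"
                      · subst h11
                        decide
                      · by_cases h12 : w = "earrings"
                        · subst h12
                          decide
                        · by_cases h13 : w = "jhumka"
                          · subst h13
                            decide
                          · by_cases h14 : w = "hair extension"
                            · subst h14
                              decide
                            · by_cases h15 : w = "hair extensions"
                              · subst h15
                                decide
                              · by_cases h16 : w = "set"
                                · subst h16
                                  decide
                                · by_cases h17 : w = "sets"
                                  · subst h17
                                    decide
                                  · by_cases h18 : w = "matching"
                                    · subst h18
                                      decide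
                                    · have hh : pvRk w = 7 := by simp [pvRk, h1, h2, h3, h4, h5, h6, h7, h8, h9, h10, h11, h12, h13, h14, h15, h16, h17, h18]
                                      rw [hh]
                                      norm_num

lemma pvStep_eq (r : Int) (hr7 : r ≤ 7) (w : String) :
    pvStep (pvAcc r) w = pvAcc (min (pvRk w) r) := by
  have hb := pvRk_bounds w
  unfold pvStep
  rw [pvGet_eq]
  by_cases hw : pvRk w ≤ 6
  · rw [if_pos hw]
    by_cases h7 : 7 ≤ r
    · have hacc : pvAcc r = none := by unfold pvAcc; rw [if_pos h7]
      have hmin : min (pvRk w) r = pvRk w := by omega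
      rw [hacc, hmin]
      unfold pvAcc
      rw [if_neg (by omega)]
    · have hacc : pvAcc r = some (pvCatName r, r) := by unfold pvAcc; rw [if_neg h7]
      rw [hacc]
      by_cases hlt : pvRk w < r
      · have hmin : min (pvRk w) r = pvRk w := by omega
        rw [hmin]
        have h1 : pvAcc (pvRk w) = some (pvCatName (pvRk w), pvRk w) := by
          unfold pvAcc; rw [if_neg (by omega)]
        rw [h1]
        show (if pvRk w < r then some (pvCatName (pvRk w), pvRk w)
              else some (pvCatName r, r)) = some (pvCatName (pvRk w), pvRk w)
        rw [if_pos hlt]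
      · have hmin : min (pvRk w) r = r := by omega
        rw [hmin, hacc]
        show (if pvRk w < r then some (pvCatName (pvRk w), pvRk w)
              else some (pvCatName r, r)) = some (pvCatName r, r)
        rw [if_neg hlt]
  · rw [if_neg hw]
    have hmin : min (pvRk w) r = r := by omega
    rw [hmin]

lemma pvFold_eq (ks : List String) : ∀ r : Int, 0 ≤ r → r ≤ 7 →
    (match ks.foldl pvStep (pvAcc r) with
     | some b => b.1
     | none => "unknown") = pvCatName (min r (pvRank ks)) := by
  induction ks with
  | nil =>
      intro r h0 h7
      have h : pvRank ([] : List String) = 7 := by simp [pvRank]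
      rw [h]
      have hm : min r 7 = r := by omega
      rw [hm]
      unfold pvAcc
      split_ifs with h'
      · have : r = 7 := by omega
        subst this; rfl
      · simp
  | cons w ks ih =>
      intro r h0 h7
      have hb := pvRk_bounds w
      rw [List.foldl_cons, pvStep_eq r h7 w, pvRank_cons w ks,
        ih (min (pvRk w) r) (by omega) (by omega)]
      have hk := pvRank_bounds ks
      exact congrArg pvCatName (by omega)

-- ===== VERDICT (by name: the statement is the Claim_ definition above) =====
theorem identify_search_category_py_spec : Claim_equal_identify_search_category_py := by
  intro ks _
  unfold Spec_identify_search_category_py identify_search_category_py_alt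
  have hinit : (none : Option (String × Int)) = pvAcc 7 := rfl
  rw [pvA_eq_rank, hinit, pvFold_eq ks 7 (by norm_num) (by norm_num)]
  have hk := pvRank_bounds ks
  exact congrArg pvCatName (by omega)
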